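-- pv_equiv track=rewrite | github.com/sphynxlee/NSCCAI2 | matrix_negtive_positive_value_detection.py | detect_positive_negative_value
-- ===== SOURCE A (Python) =====
-- def detect_positive_negative_value (matrix):
--     positive_counter = 0
--     negative_counter = 0
--
--     for row in matrix:
--         for ele in row:
--             if ele < 0:
--                 negative_counter += 1
--             else:
--                 positive_counter += 1
--
--     return (positive_counter, negative_counter)
-- ===== SOURCE B (Python) =====
-- def detect_positive_negative_value(matrix):
--     total = sum(len(row) for row in matrix)
--     negatives = sum(1 for row in matrix for ele in row if ele < 0)
--     return (total - negatives, negatives)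
-- ===== Notes on version B (the rewrite author's own statement) =====
-- stated objective: simpler
-- what changed: B counts only the negatives and derives the non-negative count as total size minus negatives, instead of maintaining two branch-updated counters per element.
import Mathlib
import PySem

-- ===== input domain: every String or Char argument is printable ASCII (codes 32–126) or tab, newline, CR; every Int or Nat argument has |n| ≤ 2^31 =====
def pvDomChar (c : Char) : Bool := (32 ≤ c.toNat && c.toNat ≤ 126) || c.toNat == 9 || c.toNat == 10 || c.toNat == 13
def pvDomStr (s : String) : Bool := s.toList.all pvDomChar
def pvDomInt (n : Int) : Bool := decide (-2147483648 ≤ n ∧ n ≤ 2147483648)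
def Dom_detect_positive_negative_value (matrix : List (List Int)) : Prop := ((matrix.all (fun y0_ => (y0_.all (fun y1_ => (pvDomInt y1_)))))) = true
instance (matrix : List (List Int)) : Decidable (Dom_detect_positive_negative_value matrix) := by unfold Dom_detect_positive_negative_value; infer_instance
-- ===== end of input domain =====

-- B derives the non-negative count as total size minus the negative count (simpler decomposition).

-- ===== PORT A =====
-- two counters, branch per element, exactly as A's nested loops
def detect_positive_negative_value (matrix : List (List Int)) : Int × Int :=
  matrix.foldl (fun acc row =>
    row.foldl (fun (acc : Int × Int) ele =>
      if ele < 0 then (acc.1, acc.2 + 1) else (acc.1 + 1, acc.2)) acc) (0, 0)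

-- ===== PORT B =====
def detect_positive_negative_value_alt (matrix : List (List Int)) : Int × Int :=
  let total : Int := (matrix.map (fun row => (row.length : Int))).sum
  let negatives : Int := (matrix.map (fun row => ((row.countP (fun ele => ele < 0)) : Int))).sum
  (total - negatives, negatives)

-- ===== PRECONDITION & SPEC =====
def Spec_detect_positive_negative_value (matrix : List (List Int)) (out : Int × Int) : Prop := out = detect_positive_negative_value_alt matrix
instance (matrix : List (List Int)) (out : Int × Int) : Decidable (Spec_detect_positive_negative_value matrix out) := by unfold Spec_detect_positive_negative_value; infer_instance

-- ===== CLAIM (what is proved, stated in full; the proofs are below) =====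
def Claim_equal_detect_positive_negative_value : Prop := ∀ (matrix : List (List Int)), Dom_detect_positive_negative_value matrix → Spec_detect_positive_negative_value matrix (detect_positive_negative_value matrix)

-- ===== LEMMAS AND PROOFS =====

-- inner loop shifts the accumulator
theorem pv_row_foldl (row : List Int) (a b : Int) :
    row.foldl (fun (acc : Int × Int) ele =>
      if ele < 0 then (acc.1, acc.2 + 1) else (acc.1 + 1, acc.2)) (a, b)
      = (a + ((row.length : Int) - (row.countP (fun ele => ele < 0) : Int)),
         b + (row.countP (fun ele => ele < 0) : Int)) := by
  induction row generalizing a b with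
  | nil => simp
  | cons x xs ih =>
    simp only [List.foldl_cons, List.countP_cons, List.length_cons]
    by_cases h : x < 0
    · simp [h, ih]; ring
    · simp [h, ih]; ring

theorem pv_outer (matrix : List (List Int)) (a b : Int) :
    matrix.foldl (fun acc row =>
      row.foldl (fun (acc : Int × Int) ele =>
        if ele < 0 then (acc.1, acc.2 + 1) else (acc.1 + 1, acc.2)) acc) (a, b)
      = (a + ((matrix.map (fun row => (row.length : Int))).sum
              - (matrix.map (fun row => ((row.countP (fun ele => ele < 0)) : Int))).sum),
         b + (matrix.map (fun row => ((row.countP (fun ele => ele < 0)) : Int))).sum) := by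
  induction matrix generalizing a b with
  | nil => simp
  | cons r rs ih =>
    simp only [List.foldl_cons, List.map_cons, List.sum_cons]
    rw [pv_row_foldl, ih, Prod.mk.injEq]
    constructor <;> ring

-- ===== VERDICT (by name: the statement is the Claim_ definition above) =====
theorem detect_positive_negative_value_spec : Claim_equal_detect_positive_negative_value := by
  intro matrix _
  unfold Spec_detect_positive_negative_value detect_positive_negative_value detect_positive_negative_value_alt
  rw [pv_outer]
  simp
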